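-- pv_equiv track=rewrite | github.com/ilialecha/Programming_2 | Tests/replacement.py | replacement
-- ===== SOURCE A (Python) =====
-- def replacement(L,LL):
--     if not 0 in L or len(LL) == 0:return L
--
--     i,ii = 0,0
--     Ll = []
--     while i < len(L) and 0 in L[i:] and ii < len(LL):
--         if L[i] == 0:
--             Ll.append(LL[ii])
--             ii+=1
--         else: Ll.append(L[i])
--         i+=1
--     return Ll
-- ===== SOURCE B (Python) =====
-- def replacement(L, LL):
--     if 0 not in L or len(LL) == 0:
--         return L
--     zeros = [i for i, x in enumerate(L) if x == 0]
--     k = min(len(zeros), len(LL))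
--     cut = zeros[k - 1]
--     it = iter(LL)
--     return [next(it) if x == 0 else x for x in L[:cut + 1]]
-- ===== Notes on version B (the rewrite author's own statement) =====
-- stated objective: alternative
-- what changed: A's while loop rescans the suffix with '0 in L[i:]' every iteration; B precomputes the zero-index table once, derives the truncation point as the min(len(zeros),len(LL))-th zero, and fills a single slice in one pass consuming LL via an iterator.
import Mathlib
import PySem

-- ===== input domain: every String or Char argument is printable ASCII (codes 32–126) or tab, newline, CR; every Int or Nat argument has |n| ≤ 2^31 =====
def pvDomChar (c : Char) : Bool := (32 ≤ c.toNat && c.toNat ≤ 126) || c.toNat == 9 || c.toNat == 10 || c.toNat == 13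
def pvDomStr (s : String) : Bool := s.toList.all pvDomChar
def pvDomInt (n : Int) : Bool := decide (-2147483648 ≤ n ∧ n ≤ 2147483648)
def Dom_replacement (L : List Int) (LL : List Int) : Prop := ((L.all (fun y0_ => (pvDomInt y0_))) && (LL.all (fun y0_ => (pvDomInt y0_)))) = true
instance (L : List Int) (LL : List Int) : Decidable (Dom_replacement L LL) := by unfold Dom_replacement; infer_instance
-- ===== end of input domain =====

-- B replaces A's while loop (which rescans the suffix with '0 in L[i:]' every step)
-- by a precomputed zero-index table, a closed-form truncation point, and one fill pass.

-- ===== PORT A =====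
-- the while loop: state (i, ii, Ll); '0 in L[i:]' is 0 ∈ L.drop i (exact: i : Nat, PySem.List.slice_from_natCast)
def replacementLoop (L : List Int) (LL : List Int) (i ii : Nat) (Ll : List Int) : List Int :=
  if h : i < L.length ∧ (0:Int) ∈ L.drop i ∧ ii < LL.length then
    if L[i]'h.1 = 0 then replacementLoop L LL (i+1) (ii+1) (Ll ++ [LL[ii]'h.2.2])
    else replacementLoop L LL (i+1) ii (Ll ++ [L[i]'h.1])
  else Ll
termination_by L.length - i

def replacement (L : List Int) (LL : List Int) : List Int :=
  if (0:Int) ∉ L ∨ LL.length = 0 then L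
  else replacementLoop L LL 0 0 []

-- ===== PORT B =====
-- '[next(it) if x == 0 else x for x in …]' consuming the iterator over LL
-- (headD's default is never reached: the slice contains at most len(LL) zeros)
def fillB : List Int → List Int → List Int
  | [], _ => []
  | x :: xs, ll => if x = 0 then ll.headD 0 :: fillB xs ll.tail else x :: fillB xs ll

def replacement_alt (L : List Int) (LL : List Int) : List Int :=
  if (0:Int) ∉ L ∨ LL.length = 0 then L
  else
    let zeros : List Int := ((PySem.List.enumerate L).filter (fun p => p.2 == 0)).map (fun p => p.1)
    let k : Nat := min zeros.length LL.length
    let cut : Int := zeros.getD (k - 1) 0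
    -- L[:cut+1]; exact since cut ≥ 0 here (zero indices are nonnegative)
    fillB (L.take (cut + 1).toNat) LL

-- ===== PRECONDITION & SPEC =====
def Spec_replacement (L : List Int) (LL : List Int) (out : List Int) : Prop := out = replacement_alt L LL
instance (L : List Int) (LL : List Int) (out : List Int) : Decidable (Spec_replacement L LL out) := by unfold Spec_replacement; infer_instance

-- ===== CLAIM (what is proved, stated in full; the proofs are below) =====
def Claim_equal_replacement : Prop := ∀ (L : List Int) (LL : List Int), Dom_replacement L LL → Spec_replacement L LL (replacement L LL)

-- ===== LEMMAS AND PROOFS =====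

/-- Proof-side normal form of A's loop body on the remaining suffix. -/
def fillStop : List Int → List Int → List Int
  | [], _ => []
  | x :: xs, ll =>
    if (0:Int) ∈ x :: xs ∧ ll ≠ [] then
      (if x = 0 then ll.headD 0 :: fillStop xs ll.tail else x :: fillStop xs ll)
    else []

/-- Proof-side recursive zero-index list. -/
def zIdx : List Int → List Int
  | [] => []
  | x :: xs => if x = 0 then 0 :: (zIdx xs).map (· + 1) else (zIdx xs).map (· + 1)

lemma fillStop_eq_nil {xs ll : List Int} (h : ¬((0:Int) ∈ xs ∧ ll ≠ [])) : fillStop xs ll = [] := by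
  cases xs with
  | nil => rfl
  | cons x xs => simp only [fillStop, if_neg h]

lemma zIdx_nonneg : ∀ (xs : List Int), ∀ y ∈ zIdx xs, (0:Int) ≤ y := by
  intro xs
  induction xs with
  | nil => simp [zIdx]
  | cons x xs ih =>
    intro y hy
    simp only [zIdx] at hy
    split at hy
    · simp only [List.mem_cons, List.mem_map] at hy
      rcases hy with rfl | ⟨z, hz, rfl⟩
      · exact le_refl 0
      · have := ih z hz; omega
    · simp only [List.mem_map] at hy
      obtain ⟨z, hz, rfl⟩ := hy; have := ih z hz; omega

lemma zIdx_nil_iff (xs : List Int) : zIdx xs = [] ↔ (0:Int) ∉ xs := by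
  induction xs with
  | nil => simp [zIdx]
  | cons x xs ih =>
    simp only [zIdx, List.mem_cons]
    split
    · simp_all
    · simp only [List.map_eq_nil_iff, ih]
      constructor
      · intro h h'; rcases h' with h' | h' <;> simp_all
      · intro h; exact fun h' => h (Or.inr h')

lemma enum_zeros (L : List Int) : ∀ (s : Int),
    ((PySem.List.enumerate L s).filter (fun p => p.2 == 0)).map (fun p => p.1)
      = (zIdx L).map (· + s) := by
  induction L with
  | nil => intro s; simp [PySem.List.enumerate_nil, zIdx]
  | cons x xs ih =>
    intro s
    simp only [PySem.List.enumerate_cons, List.filter_cons, zIdx]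
    by_cases hx : x = 0
    · simp [hx, ih (s+1), List.map_map]
      intro a _; omega
    · simp [hx, ih (s+1), List.map_map]
      intro a _; omega

lemma loop_eq (L LL : List Int) : ∀ (n i ii : Nat), L.length - i ≤ n → ∀ (Ll : List Int),
    replacementLoop L LL i ii Ll = Ll ++ fillStop (L.drop i) (LL.drop ii) := by
  intro n
  induction n with
  | zero =>
    intro i ii h Ll
    have hi : L.length ≤ i := by omega
    rw [replacementLoop, dif_neg (by rintro ⟨h1, -, -⟩; omega)]
    simp [List.drop_eq_nil_of_le hi, fillStop]
  | succ n ih =>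
    intro i ii h Ll
    rw [replacementLoop]
    by_cases hc : i < L.length ∧ (0:Int) ∈ L.drop i ∧ ii < LL.length
    · rw [dif_pos hc]
      obtain ⟨h1, h2, h3⟩ := hc
      have hdL : L.drop i = L[i] :: L.drop (i+1) := List.drop_eq_getElem_cons h1
      have hdLL : LL.drop ii = LL[ii] :: LL.drop (ii+1) := List.drop_eq_getElem_cons h3
      conv_rhs => rw [hdL]
      have hcond : (0:Int) ∈ L[i] :: L.drop (i+1) ∧ LL.drop ii ≠ [] :=
        ⟨by rw [← hdL]; exact h2, by rw [hdLL]; exact List.cons_ne_nil _ _⟩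
      simp only [fillStop, if_pos hcond]
      by_cases hz : L[i] = 0
      · rw [if_pos hz, ih (i+1) (ii+1) (by omega) (Ll ++ [LL[ii]]), hdLL]
        simp [hz, List.getElem?_eq_getElem h3]
      · rw [if_neg hz, ih (i+1) ii (by omega) (Ll ++ [L[i]])]
        simp [hz]
    · rw [dif_neg hc]
      have : fillStop (L.drop i) (LL.drop ii) = [] := by
        apply fillStop_eq_nil
        rintro ⟨hm, hne⟩
        apply hc
        refine ⟨?_, hm, ?_⟩
        · by_contra hi
          rw [List.drop_eq_nil_of_le (by omega)] at hm; simp at hm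
        · by_contra hii
          rw [List.drop_eq_nil_of_le (by omega)] at hne; simp at hne
      rw [this, List.append_nil]

lemma fill_eq : ∀ (xs ll : List Int), (0:Int) ∈ xs → ll ≠ [] →
    fillStop xs ll
      = fillB (xs.take ((zIdx xs).getD (min (zIdx xs).length ll.length - 1) 0 + 1).toNat) ll := by
  intro xs
  induction xs with
  | nil => intro ll h; simp at h
  | cons x xs ih =>
    intro ll hmem hll
    have hcond : (0:Int) ∈ x :: xs ∧ ll ≠ [] := ⟨hmem, hll⟩
    have hl1 : 1 ≤ ll.length := List.length_pos_of_ne_nil hll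
    by_cases hx : x = 0
    · -- head is a zero
      subst hx
      simp only [fillStop, if_pos hcond, zIdx, reduceIte, List.length_cons, List.length_map]
      by_cases h2 : (0:Int) ∈ xs ∧ ll.tail ≠ []
      · obtain ⟨hm', ht'⟩ := h2
        have hz' : zIdx xs ≠ [] := by rw [ne_eq, zIdx_nil_iff]; simpa using hm'
        have hzl : 1 ≤ (zIdx xs).length := List.length_pos_of_ne_nil hz'
        have hll2 : 2 ≤ ll.length := by
          rcases ll with - | ⟨a, t⟩
          · simp at hll
          · rcases t with - | ⟨b, t⟩
            · simp at ht'
            · simp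
        set z' := zIdx xs with hz
        set k := min (z'.length + 1) ll.length with hk
        have hk2 : 2 ≤ k := by omega
        have hkz : k - 2 < z'.length := by omega
        have hj : k - 1 = (k - 2) + 1 := by omega
        rw [hj, List.getD_cons_succ,
          List.getD_eq_getElem _ _ (by simpa using hkz)]
        simp only [List.getElem_map]
        have hnn : (0:Int) ≤ z'[k-2] := zIdx_nonneg xs _ (List.getElem_mem _)
        have htoNat : (z'[k-2]'hkz + 1 + 1).toNat = (z'[k-2]'hkz + 1).toNat + 1 := by omega
        rw [htoNat, List.take_succ_cons]
        simp only [fillB, reduceIte]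
        congr 1
        rw [ih ll.tail hm' ht']
        have hmin : min z'.length ll.tail.length - 1 = k - 2 := by
          simp only [List.length_tail]; omega
        rw [hmin, List.getD_eq_getElem _ _ hkz]
      · -- last consumable zero is this one: truncate here
        have hk1 : min ((zIdx xs).length + 1) ll.length = 1 := by
          rcases not_and_or.1 h2 with hm' | ht'
          · have hzn : zIdx xs = [] := (zIdx_nil_iff xs).2 (by simpa using hm')
            simp [hzn]; omega
          · have : ll.length = 1 := by
              rcases ll with - | ⟨a, t⟩
              · simp at hll
              · have : t = [] := by simpa using ht'
                simp [this]
            omega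
        rw [hk1]
        simp only [Nat.sub_self, List.getD_cons_zero]
        norm_num
        simp only [fillB, reduceIte]
        rw [fillStop_eq_nil h2]
        rcases ll with - | ⟨a, t⟩
        · simp at hll
        · simp
    · -- head is not a zero
      have hm' : (0:Int) ∈ xs := by
        rcases List.mem_cons.1 hmem with h | h
        · exact absurd h.symm hx
        · exact h
      simp only [fillStop, if_pos hcond, if_neg hx, zIdx, List.length_map]
      have hz' : zIdx xs ≠ [] := by rw [ne_eq, zIdx_nil_iff]; simpa using hm'
      have hzl : 1 ≤ (zIdx xs).length := List.length_pos_of_ne_nil hz'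
      set z' := zIdx xs with hz
      set k := min z'.length ll.length with hk
      have hk1 : 1 ≤ k := by omega
      have hkz : k - 1 < z'.length := by omega
      rw [List.getD_eq_getElem _ _ (by simpa using hkz)]
      simp only [List.getElem_map]
      have hnn : (0:Int) ≤ z'[k-1] := zIdx_nonneg xs _ (List.getElem_mem _)
      have htoNat : (z'[k-1]'hkz + 1 + 1).toNat = (z'[k-1]'hkz + 1).toNat + 1 := by omega
      rw [htoNat, List.take_succ_cons]
      simp only [fillB, if_neg hx]
      congr 1
      rw [ih ll hm' hll, ← hk, List.getD_eq_getElem _ _ hkz]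

-- ===== VERDICT (by name: the statement is the Claim_ definition above) =====
theorem replacement_spec : Claim_equal_replacement := by
  intro L LL _
  unfold Spec_replacement replacement replacement_alt
  by_cases hc : (0:Int) ∉ L ∨ LL.length = 0
  · rw [if_pos hc, if_pos hc]
  · rw [if_neg hc, if_neg hc]
    push Not at hc
    obtain ⟨hmem, hlen⟩ := hc
    have hll : LL ≠ [] := by intro h; simp [h] at hlen
    rw [loop_eq L LL L.length 0 0 (by omega) []]
    simp only [List.drop_zero, List.nil_append]
    rw [fill_eq L LL hmem hll]
    rw [enum_zeros L 0]
    simp
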